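-- pv_equiv track=rewrite | github.com/Artiprocher/sd-webui-fastblend | scripts/api.py | task_list
-- ===== SOURCE A (Python) =====
-- import cv2, functools, imageio, os
--
-- def task_list(n):
--     tasks = []
--     max_level = 1
--     while (1<<max_level)<=n:
--         max_level += 1
--     for i in range(n):
--         j = i
--         for level in range(max_level):
--             if i&(1<<level):
--                 continue
--             j |= 1<<level
--             if j>=n:
--                 break
--             meta_data = {
--                 "source": i,
--                 "target": j,
--                 "level": level + 1
--             }
--             tasks.append(meta_data)
--     tasks.sort(key=functools.cmp_to_key(lambda u, v: u["level"]-v["level"]))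
--     return tasks
-- ===== SOURCE B (Python) =====
-- def task_list(n):
--     # Level-major enumeration: at level (1-based level+1) the pair is (i, i | mask)
--     # with mask = 2**(level+1) - 1, valid when bit `level` of i is 0 and i | mask < n.
--     # Emitting levels in increasing order reproduces the stable sort-by-level directly.
--     tasks = []
--     level = 0
--     while 2 ** (level + 1) - 1 < n:
--         step = 2 ** level
--         mask = 2 * step - 1
--         for i in range(n):
--             if i & step == 0 and (i | mask) < n:
--                 tasks.append({"source": i, "target": i | mask, "level": level + 1})
--         level += 1
--     return tasks
-- ===== Notes on version B (the rewrite author's own statement) =====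
-- stated objective: faster
-- what changed: B enumerates tasks level-major (outer loop over levels, inner scan computing the target as i|mask directly), emitting buckets already in level order, which removes A's per-i bit accumulation with break and the final cmp_to_key comparison sort entirely.
import Mathlib
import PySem

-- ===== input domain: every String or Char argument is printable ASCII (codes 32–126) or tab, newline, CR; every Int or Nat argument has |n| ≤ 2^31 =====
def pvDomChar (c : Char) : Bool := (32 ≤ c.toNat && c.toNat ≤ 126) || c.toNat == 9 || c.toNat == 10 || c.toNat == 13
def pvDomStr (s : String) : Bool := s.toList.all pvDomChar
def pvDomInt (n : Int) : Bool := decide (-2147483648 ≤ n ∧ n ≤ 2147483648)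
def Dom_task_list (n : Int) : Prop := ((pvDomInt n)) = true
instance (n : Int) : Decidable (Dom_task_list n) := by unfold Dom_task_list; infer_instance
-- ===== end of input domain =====

-- B enumerates the tasks level-major (outer loop over levels, target computed directly as i|mask),
-- producing the buckets already in level order, which removes A's final cmp_to_key comparison sort.

-- ===== PORT A =====

/-- the dict literal {"source": i, "target": j, "level": l} as an insertion-ordered assoc list -/
def pvTask (i j l : Int) : List (String × Int) := [("source", i), ("target", j), ("level", l)]

/-- `max_level = 1; while (1<<max_level)<=n: max_level += 1`
    (structural fuel recursion; `n.natAbs + 1` steps always suffice, proved in `pv_maxLevelA_gt`/`pv_maxLevelA_le`) -/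
def pvMaxLevelA (n : Int) (fuel m : Nat) : Nat :=
  match fuel with
  | 0 => m
  | fuel + 1 => if (1 : Int) <<< m ≤ n then pvMaxLevelA n fuel (m + 1) else m

/-- Python's `u["level"]` on a task dict (the key is always present in these dicts, so exact);
    `functools.cmp_to_key(lambda u, v: u["level"]-v["level"])` orders stably by exactly this key. -/
def pvLevelKey (t : List (String × Int)) : Int := (t.lookup "level").getD 0

/-- the inner `for level in range(max_level)` loop with its running `j`, `continue` and `break`;
    `1 << level` is `(1 : Int) <<< level.toNat` (exact: level comes from `range(max_level)`, so 0 ≤ level). -/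
def pvInnerA (n i : Int) (levels : List Int) (j : Int)
    (acc : List (List (String × Int))) : List (List (String × Int)) :=
  match levels with
  | [] => acc
  | l :: ls =>
    if PySem.Int.band i ((1 : Int) <<< l.toNat) ≠ 0 then
      pvInnerA n i ls j acc
    else
      let j' := PySem.Int.bor j ((1 : Int) <<< l.toNat)
      if n ≤ j' then acc
      else pvInnerA n i ls j' (acc ++ [pvTask i j' (l + 1)])

def task_list (n : Int) : List (List (String × Int)) :=
  let maxLevel := pvMaxLevelA n (n.natAbs + 1) 1
  let tasks := (PySem.List.pyRange 0 n).foldl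
      (fun acc i => pvInnerA n i (PySem.List.pyRange 0 (maxLevel : Int)) i acc) []
  PySem.List.sorted tasks pvLevelKey

-- ===== PORT B =====

/-- one pass of B's inner `for i in range(n)` loop (the level-`level` bucket) -/
def pvBucketB (n : Int) (level : Nat) : List (List (String × Int)) :=
  let step : Int := 2 ^ level
  let mask : Int := 2 * step - 1
  (PySem.List.pyRange 0 n).foldl
    (fun acc i =>
      if PySem.Int.band i step = 0 ∧ PySem.Int.bor i mask < n then
        acc ++ [pvTask i (PySem.Int.bor i mask) ((level : Int) + 1)]
      else acc) []

/-- B's `while 2**(level+1) - 1 < n` loop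
    (structural fuel recursion; `n.natAbs + 1` steps always suffice, proved in `pv_loopB_char`/`pv_L_le`) -/
def pvLoopB (n : Int) (fuel level : Nat) (tasks : List (List (String × Int))) :
    List (List (String × Int)) :=
  match fuel with
  | 0 => tasks
  | fuel + 1 =>
    if (2 : Int) ^ (level + 1) - 1 < n then
      pvLoopB n fuel (level + 1) (tasks ++ pvBucketB n level)
    else tasks

def task_list_alt (n : Int) : List (List (String × Int)) := pvLoopB n (n.natAbs + 1) 0 []

-- ===== PRECONDITION & SPEC =====
def Spec_task_list (n : Int) (out : List (List (String × Int))) : Prop := out = task_list_alt n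
instance (n : Int) (out : List (List (String × Int))) : Decidable (Spec_task_list n out) := by unfold Spec_task_list; infer_instance

-- ===== CLAIM (what is proved, stated in full; the proofs are below) =====
def Claim_equal_task_list : Prop := ∀ (n : Int), Dom_task_list n → Spec_task_list n (task_list n)

-- ===== LEMMAS AND PROOFS =====

/-- proof-side canonical form of the task emitted for index `i` at 0-based level `l` (or nothing) -/
def pvSel (n i : Int) (l : Nat) : List (List (String × Int)) :=
  if PySem.Int.band i (2 ^ l) = 0 ∧ PySem.Int.bor i (2 ^ (l + 1) - 1) < n then
    [pvTask i (PySem.Int.bor i (2 ^ (l + 1) - 1)) ((l : Int) + 1)]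
  else []

/-- proof-side canonical level-`l` bucket -/
def pvC (n : Int) (l : Nat) : List (List (String × Int)) :=
  (PySem.List.pyRange 0 n).flatMap (fun i => pvSel n i l)

lemma pv_shift_pow (k : Nat) : (1 : Int) <<< k = 2 ^ k := by
  rw [Int.shiftLeft_eq, one_mul]

lemma pv_mask_cast (k : Nat) : (2 : Int) ^ k - 1 = ((2 ^ k - 1 : Nat) : Int) := by
  have h : (1 : Nat) ≤ 2 ^ k := Nat.one_le_two_pow
  push_cast [h]
  ring

lemma pv_two_pow_cast (k : Nat) : (2 : Int) ^ k = ((2 ^ k : Nat) : Int) := by push_cast; rfl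

-- Nat-level bit facts
lemma pvN_or_mask_absorb (m k k' : Nat) (h : k ≤ k') :
    (m ||| (2 ^ k - 1)) ||| (2 ^ k' - 1) = m ||| (2 ^ k' - 1) := by
  apply Nat.eq_of_testBit_eq; intro j
  simp only [Nat.testBit_or, Nat.testBit_two_pow_sub_one, Bool.or_assoc]
  congr 1
  by_cases hj : j < k' <;> by_cases hj2 : j < k <;> simp [hj, hj2] <;> omega

lemma pvN_or_step (m k : Nat) :
    (m ||| (2 ^ k - 1)) ||| 2 ^ k = m ||| (2 ^ (k + 1) - 1) := by
  apply Nat.eq_of_testBit_eq; intro j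
  simp only [Nat.testBit_or, Nat.testBit_two_pow_sub_one, Nat.testBit_two_pow, Bool.or_assoc]
  congr 1
  by_cases h1 : j < k
  · simp [h1]; omega
  · by_cases h2 : k = j <;> simp [h1, h2] <;> omega

lemma pvN_or_testBit_true (m k : Nat) (h : m.testBit k = true) :
    m ||| (2 ^ k - 1) = m ||| (2 ^ (k + 1) - 1) := by
  apply Nat.eq_of_testBit_eq; intro j
  simp only [Nat.testBit_or, Nat.testBit_two_pow_sub_one]
  by_cases hj : j = k
  · subst hj; simp [h]
  · by_cases h1 : j < k <;> by_cases h2 : j < k + 1 <;> simp [h1, h2] <;> omega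

lemma pvN_or_mask_mono (m : Nat) {k k' : Nat} (h : k ≤ k') :
    m ||| (2 ^ k - 1) ≤ m ||| (2 ^ k' - 1) := by
  rw [← pvN_or_mask_absorb m k k' h]; exact Nat.left_le_or

-- Int-level wrappers (for 0 ≤ i)
lemma pv_bor_mask (i : Int) (hi : 0 ≤ i) (k : Nat) :
    PySem.Int.bor i ((2 : Int) ^ k - 1) = ((i.toNat ||| (2 ^ k - 1) : Nat) : Int) := by
  have h := PySem.Int.bor_natCast i.toNat (2 ^ k - 1)
  rw [Int.toNat_of_nonneg hi] at h
  rw [pv_mask_cast, h]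

lemma pv_bor_mask_mono (i : Int) (hi : 0 ≤ i) {k k' : Nat} (h : k ≤ k') :
    PySem.Int.bor i ((2 : Int) ^ k - 1) ≤ PySem.Int.bor i ((2 : Int) ^ k' - 1) := by
  rw [pv_bor_mask i hi, pv_bor_mask i hi]
  exact_mod_cast pvN_or_mask_mono i.toNat h

lemma pv_mask_le_bor (i : Int) (hi : 0 ≤ i) (k : Nat) :
    (2 : Int) ^ k - 1 ≤ PySem.Int.bor i ((2 : Int) ^ k - 1) := by
  rw [pv_bor_mask i hi, pv_mask_cast]
  exact_mod_cast Nat.right_le_or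

lemma pv_bor_step (i : Int) (hi : 0 ≤ i) (k : Nat) :
    PySem.Int.bor (PySem.Int.bor i ((2 : Int) ^ k - 1)) ((2 : Int) ^ k)
      = PySem.Int.bor i ((2 : Int) ^ (k + 1) - 1) := by
  rw [pv_bor_mask i hi, pv_bor_mask i hi, pv_two_pow_cast, PySem.Int.bor_natCast]
  exact_mod_cast congrArg (Nat.cast : Nat → Int) (pvN_or_step i.toNat k)

lemma pv_bor_testBit_true (i : Int) (hi : 0 ≤ i) (k : Nat) (h : i.toNat.testBit k = true) :
    PySem.Int.bor i ((2 : Int) ^ k - 1) = PySem.Int.bor i ((2 : Int) ^ (k + 1) - 1) := by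
  rw [pv_bor_mask i hi, pv_bor_mask i hi]
  exact_mod_cast congrArg (Nat.cast : Nat → Int) (pvN_or_testBit_true i.toNat k h)

lemma pv_band_two_pow (i : Int) (hi : 0 ≤ i) (k : Nat) :
    (PySem.Int.band i ((2 : Int) ^ k) = 0) ↔ i.toNat.testBit k = false := by
  have h := PySem.Int.band_natCast i.toNat (2 ^ k)
  rw [Int.toNat_of_nonneg hi] at h
  rw [pv_two_pow_cast, h, Nat.and_two_pow]
  have h2 : (0 : Nat) < 2 ^ k := Nat.two_pow_pos k
  cases hb : i.toNat.testBit k <;> simp [hb] <;> omega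

lemma pv_pyRange_nil {a b : Int} (h : b ≤ a) : PySem.List.pyRange a b = [] := by
  rw [PySem.List.pyRange_one]
  have : (b - a).toNat = 0 := by omega
  simp [this]

-- characterization of A's inner loop
lemma pv_innerA_char (n : Int) (L : Nat) :
    ∀ (d a : Nat) (i : Int), 0 ≤ i → L - a ≤ d →
    ∀ acc, pvInnerA n i (PySem.List.pyRange (a : Int) (L : Int))
        (PySem.Int.bor i ((2 : Int) ^ a - 1)) acc
      = acc ++ (PySem.List.pyRange (a : Int) (L : Int)).flatMap (fun l => pvSel n i l.toNat) := by
  intro d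
  induction d with
  | zero =>
    intro a i hi hle acc
    rw [pv_pyRange_nil (by omega)]
    simp [pvInnerA]
  | succ d ih =>
    intro a i hi hle acc
    by_cases hlt : a < L
    · have hcons : PySem.List.pyRange (a : Int) (L : Int)
          = (a : Int) :: PySem.List.pyRange ((a : Int) + 1) (L : Int) :=
        PySem.List.pyRange_one_cons (by exact_mod_cast hlt)
      have hca : ((a : Int)) + 1 = ((a + 1 : Nat) : Int) := by push_cast; ring
      rw [hcons]
      simp only [pvInnerA, Int.toNat_natCast, pv_shift_pow]
      cases hb : i.toNat.testBit a with
      | true =>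
        have hband : PySem.Int.band i ((2 : Int) ^ a) ≠ 0 := by
          intro h0; rw [(pv_band_two_pow i hi a).mp h0] at hb; cases hb
        rw [if_pos hband, pv_bor_testBit_true i hi a hb, List.flatMap_cons]
        simp only [Int.toNat_natCast]
        have hsel : pvSel n i a = [] := by
          simp [pvSel, hband]
        rw [hsel, List.nil_append, hca]
        exact ih (a + 1) i hi (by omega) acc
      | false =>
        have hband : PySem.Int.band i ((2 : Int) ^ a) = 0 :=
          (pv_band_two_pow i hi a).mpr hb
        rw [if_neg (by simp [hband])]
        simp only [pv_bor_step i hi a]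
        by_cases hbr : n ≤ PySem.Int.bor i ((2 : Int) ^ (a + 1) - 1)
        · rw [if_pos hbr, List.flatMap_cons]
          simp only [Int.toNat_natCast]
          have hsel : pvSel n i a = [] := by
            simp only [pvSel]
            rw [if_neg]
            rintro ⟨_, hlt2⟩
            omega
          rw [hsel, List.nil_append]
          have hrest : (PySem.List.pyRange ((a : Int) + 1) (L : Int)).flatMap
              (fun l => pvSel n i l.toNat) = [] := by
            rw [List.flatMap_eq_nil_iff]
            intro l hl
            have hml := PySem.List.mem_pyRange_one.mp hl
            have hmono := pv_bor_mask_mono i hi (k := a + 1) (k' := l.toNat + 1) (by omega)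
            simp only [pvSel]
            rw [if_neg]
            rintro ⟨_, hlt2⟩
            omega
          rw [hrest, List.append_nil]
        · rw [if_neg hbr, List.flatMap_cons]
          simp only [Int.toNat_natCast]
          have hsel : pvSel n i a
              = [pvTask i (PySem.Int.bor i ((2 : Int) ^ (a + 1) - 1)) ((a : Int) + 1)] := by
            simp only [pvSel]
            rw [if_pos ⟨hband, by omega⟩]
          rw [hsel, hca]
          rw [ih (a + 1) i hi (by omega) (acc ++ [pvTask i (PySem.Int.bor i ((2 : Int) ^ (a + 1) - 1)) (((a + 1 : Nat) : Int))])]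
          simp [List.append_assoc]
    · rw [pv_pyRange_nil (by omega)]
      simp [pvInnerA]

-- A's task list before sorting, in canonical form
lemma pv_taskA_char (n : Int) :
    task_list n = PySem.List.sorted
      ((PySem.List.pyRange 0 n).flatMap (fun i =>
        (PySem.List.pyRange 0 ((pvMaxLevelA n (n.natAbs + 1) 1 : Nat) : Int)).flatMap
          (fun l => pvSel n i l.toNat)))
      pvLevelKey := by
  have hstep : (PySem.List.pyRange 0 n).foldl
      (fun acc i => pvInnerA n i (PySem.List.pyRange 0 ((pvMaxLevelA n (n.natAbs + 1) 1 : Nat) : Int)) i acc) []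
      = (PySem.List.pyRange 0 n).flatMap (fun i =>
          (PySem.List.pyRange 0 ((pvMaxLevelA n (n.natAbs + 1) 1 : Nat) : Int)).flatMap
            (fun l => pvSel n i l.toNat)) := by
    rw [PySem.List.foldl_congr_mem (PySem.List.pyRange 0 n) _
        (fun acc i => acc ++ (PySem.List.pyRange 0 ((pvMaxLevelA n (n.natAbs + 1) 1 : Nat) : Int)).flatMap
          (fun l => pvSel n i l.toNat)) []
        (by
          intro acc i hi
          have h0 : (0 : Int) ≤ i := (PySem.List.mem_pyRange_one.mp hi).1
          have h := pv_innerA_char n (pvMaxLevelA n (n.natAbs + 1) 1) (pvMaxLevelA n (n.natAbs + 1) 1) 0 i h0 (by omega) acc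
          simpa using h)]
    rw [PySem.List.foldl_append_eq_flatMap]
    simp
  simp only [task_list]
  rw [hstep]

-- stable sort = concatenation of key buckets
lemma pv_insertBy_skip {α : Type} (before : α → α → Bool) (x : α) (l r : List α)
    (h : ∀ y ∈ l, before x y = false) :
    PySem.List.insertBy before x (l ++ r) = l ++ PySem.List.insertBy before x r := by
  induction l with
  | nil => rfl
  | cons y ys ih =>
    simp only [List.cons_append, PySem.List.insertBy, h y (by simp)]
    simp only [Bool.false_eq_true, if_false, List.cons.injEq, true_and]
    exact ih (fun z hz => h z (by simp [hz]))

lemma pv_insertBy_front {α : Type} (before : α → α → Bool) (x : α) (r : List α)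
    (h : ∀ y ∈ r, before x y = true) :
    PySem.List.insertBy before x r = x :: r := by
  cases r with
  | nil => rfl
  | cons y ys => simp [PySem.List.insertBy, h y (by simp)]

lemma pv_insertBy_buckets {α : Type} (key : α → Int) (x : α) :
    ∀ (ks : List Int) (F : Int → List α), ks.Pairwise (· < ·) →
    (∀ k ∈ ks, ∀ y ∈ F k, key y = k) → key x ∈ ks →
    PySem.List.insertBy (fun a b => decide (key a < key b)) x (ks.flatMap F)
      = ks.flatMap (fun k => F k ++ if key x = k then [x] else []) := by
  intro ks
  induction ks with
  | nil => intro F _ _ hx; cases hx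
  | cons k ks ih =>
    intro F hp hF hx
    have hpk : ∀ z ∈ ks, k < z := (List.pairwise_cons.mp hp).1
    have hp' := (List.pairwise_cons.mp hp).2
    simp only [List.flatMap_cons]
    by_cases hk : key x = k
    · have hl : ∀ y ∈ F k, (decide (key x < key y)) = false := by
        intro y hy
        have hyk := hF k (by simp) y hy
        simp [hyk, hk]
      have hr : ∀ z ∈ ks.flatMap F, (decide (key x < key z)) = true := by
        intro z hz
        rcases List.mem_flatMap.mp hz with ⟨k', hk', hz'⟩
        have hzk := hF k' (by simp [hk']) z hz'
        simp only [hzk, hk, decide_eq_true_eq]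
        exact hpk k' hk'
      rw [pv_insertBy_skip _ _ _ _ hl, pv_insertBy_front _ _ _ hr]
      have ht : ks.flatMap (fun k' => F k' ++ if key x = k' then [x] else [])
          = ks.flatMap F := by
        apply List.flatMap_congr
        intro k' hk'
        have hne : key x ≠ k' := by have := hpk k' hk'; omega
        simp [hne]
      rw [ht, if_pos hk]
      simp
    · have hx' : key x ∈ ks := by
        rcases List.mem_cons.mp hx with h | h
        · exact absurd h hk
        · exact h
      have hkx : k < key x := hpk _ hx'
      have hl : ∀ y ∈ F k, (decide (key x < key y)) = false := by
        intro y hy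
        have hyk := hF k (by simp) y hy
        simp only [hyk, decide_eq_false_iff_not]
        omega
      rw [pv_insertBy_skip _ _ _ _ hl,
        ih F hp' (fun k' h' => hF k' (by simp [h'])) hx', if_neg hk]
      simp

lemma pv_sorted_buckets {α : Type} (key : α → Int) (ks : List Int)
    (hks : ks.Pairwise (· < ·)) :
    ∀ (xs : List α), (∀ x ∈ xs, key x ∈ ks) →
    PySem.List.sorted xs key
      = ks.flatMap (fun k => xs.filter (fun x => decide (key x = k))) := by
  intro xs
  induction xs using List.reverseRecOn with
  | nil =>
    intro _
    rw [PySem.List.sorted_eq_foldl_insertBy]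
    simp
  | append_singleton xs x ih =>
    intro hcov
    rw [PySem.List.sorted_eq_foldl_insertBy, List.foldl_append,
      ← PySem.List.sorted_eq_foldl_insertBy]
    simp only [List.foldl_cons, List.foldl_nil]
    rw [ih (fun y hy => hcov y (by simp [hy]))]
    rw [pv_insertBy_buckets key x ks _ hks
        (by
          intro k hk y hy
          have := (List.mem_filter.mp hy).2
          simpa using this)
        (hcov x (by simp))]
    apply List.flatMap_congr
    intro k hk
    rw [List.filter_append]
    by_cases h : key x = k <;> simp [h]

@[simp] lemma pv_key_task (i j l : Int) : pvLevelKey (pvTask i j l) = l := rfl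

lemma pv_filter_sel (n i : Int) (l : Nat) (k : Int) :
    (pvSel n i l).filter (fun t => decide (pvLevelKey t = k))
      = if ((l : Int) + 1 = k) then pvSel n i l else [] := by
  unfold pvSel
  by_cases hc : PySem.Int.band i (2 ^ l) = 0 ∧ PySem.Int.bor i (2 ^ (l + 1) - 1) < n <;>
    by_cases hk : ((l : Int) + 1 = k) <;> simp [hc, hk]

lemma pv_flatMap_ite {β κ : Type} [DecidableEq κ] (g : κ → List β) (ks : List κ) (k : κ)
    (hnd : ks.Nodup) (hk : k ∈ ks) :
    ks.flatMap (fun l => if l = k then g l else []) = g k := by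
  induction ks with
  | nil => cases hk
  | cons l ls ih =>
    rcases List.mem_cons.mp hk with h | h
    · have hk' : l ∉ ls := (List.nodup_cons.mp hnd).1
      have ht : ls.flatMap (fun l' => if l' = k then g l' else []) = [] := by
        rw [List.flatMap_eq_nil_iff]
        intro x hx
        have hne : x ≠ k := by
          rw [h]; intro he; exact hk' (he ▸ hx)
        simp [hne]
      simp [← h, ht]
    · have hne : l ≠ k := by
        intro he; subst he; exact (List.nodup_cons.mp hnd).1 h
      simp only [List.flatMap_cons, if_neg hne, List.nil_append]
      exact ih (List.nodup_cons.mp hnd).2 h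

-- A's final value in bucket form
lemma pv_A_eq (n : Int) :
    task_list n = (PySem.List.pyRange 0 ((pvMaxLevelA n (n.natAbs + 1) 1 : Nat) : Int)).flatMap
      (fun l => pvC n l.toNat) := by
  rw [pv_taskA_char]
  rw [pv_sorted_buckets pvLevelKey
      (PySem.List.pyRange 1 (((pvMaxLevelA n (n.natAbs + 1) 1 : Nat) : Int) + 1))
      (PySem.List.pairwise_lt_pyRange_one _ _) _
      (by
        intro x hx
        rcases List.mem_flatMap.mp hx with ⟨i, hi, hx2⟩
        rcases List.mem_flatMap.mp hx2 with ⟨l, hl, hx3⟩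
        have hml := PySem.List.mem_pyRange_one.mp hl
        simp only [pvSel] at hx3
        split at hx3
        · simp only [List.mem_singleton] at hx3
          subst hx3
          rw [pv_key_task, PySem.List.mem_pyRange_one]
          omega
        · cases hx3)]
  rw [PySem.List.pyRange_one 1 (((pvMaxLevelA n (n.natAbs + 1) 1 : Nat) : Int) + 1),
    PySem.List.pyRange_one 0 ((pvMaxLevelA n (n.natAbs + 1) 1 : Nat) : Int),
    List.flatMap_map, List.flatMap_map]
  have hlen : ((((pvMaxLevelA n (n.natAbs + 1) 1 : Nat) : Int) + 1) - 1).toNat = pvMaxLevelA n (n.natAbs + 1) 1 := by omega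
  have hlen0 : (((pvMaxLevelA n (n.natAbs + 1) 1 : Nat) : Int) - 0).toNat = pvMaxLevelA n (n.natAbs + 1) 1 := by omega
  rw [hlen, hlen0]
  apply List.flatMap_congr
  intro j hj
  have hjL : j < pvMaxLevelA n (n.natAbs + 1) 1 := List.mem_range.mp hj
  rw [List.filter_flatMap]
  unfold pvC
  apply List.flatMap_congr
  intro i hi
  rw [List.filter_flatMap, List.flatMap_map]
  refine Eq.trans (List.flatMap_congr
      (g := fun k => if k = j then pvSel n i ((0 + (k : Int)).toNat) else []) ?_) ?_
  · intro k hk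
    simp only [zero_add, Int.toNat_natCast]
    rw [pv_filter_sel]
    exact if_congr (by omega) rfl rfl
  · exact pv_flatMap_ite _ _ j List.nodup_range (List.mem_range.mpr hjL)

-- B's loop and buckets in canonical form
lemma pv_foldl_if_flatMap {α β : Type} (p : α → Prop) [DecidablePred p] (f : α → β)
    (l : List α) :
    ∀ acc, l.foldl (fun acc x => if p x then acc ++ [f x] else acc) acc
      = acc ++ l.flatMap (fun x => if p x then [f x] else []) := by
  induction l with
  | nil => simp
  | cons y ys ih =>
    intro acc
    by_cases h : p y <;> simp [h, ih, List.append_assoc]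

lemma pv_bucketB_eq (n : Int) (l : Nat) : pvBucketB n l = pvC n l := by
  unfold pvBucketB pvC
  rw [pv_foldl_if_flatMap]
  simp only [List.nil_append]
  apply List.flatMap_congr
  intro i _
  have hm : (2 : Int) * 2 ^ l - 1 = 2 ^ (l + 1) - 1 := by ring
  simp only [pvSel, hm]

lemma pv_maxLevelA_gt (n : Int) :
    ∀ (fuel m : Nat), n < 2 ^ (m + fuel) → n < (2 : Int) ^ (pvMaxLevelA n fuel m) := by
  intro fuel
  induction fuel with
  | zero => intro m h; simpa using h
  | succ fuel ih =>
    intro m h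
    rw [pvMaxLevelA]
    by_cases hg : (1 : Int) <<< m ≤ n
    · rw [if_pos hg]
      have he : m + (fuel + 1) = m + 1 + fuel := by omega
      rw [he] at h
      exact ih (m + 1) h
    · rw [if_neg hg]
      rw [pv_shift_pow] at hg
      omega

lemma pv_maxLevelA_last (n : Int) :
    ∀ (fuel m : Nat), pvMaxLevelA n fuel m = m ∨
      (2 : Int) ^ (pvMaxLevelA n fuel m - 1) ≤ n := by
  intro fuel
  induction fuel with
  | zero => intro m; left; rfl
  | succ fuel ih =>
    intro m
    rw [pvMaxLevelA]
    by_cases hg : (1 : Int) <<< m ≤ n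
    · rw [if_pos hg]
      rcases ih (m + 1) with h | h
      · right; rw [h]; simpa [pv_shift_pow] using hg
      · right; exact h
    · rw [if_neg hg]; left; rfl

lemma pv_nat_lt_two_pow_int (k : Nat) : ((k : Int)) < (2 : Int) ^ k := by
  have h1 : k < 2 ^ k := Nat.lt_two_pow_self
  have h2 : ((2 ^ k : Nat) : Int) = (2 : Int) ^ k := by push_cast; rfl
  omega

lemma pv_maxLevelA_top (n : Int) : n < (2 : Int) ^ (pvMaxLevelA n (n.natAbs + 1) 1) := by
  apply pv_maxLevelA_gt n (n.natAbs + 1) 1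
  have h1 := pv_nat_lt_two_pow_int n.natAbs
  have h2 : (2 : Int) ^ n.natAbs ≤ 2 ^ (1 + (n.natAbs + 1)) :=
    pow_le_pow_right₀ (by norm_num) (by omega)
  omega

lemma pv_L_le (n : Int) : pvMaxLevelA n (n.natAbs + 1) 1 ≤ n.natAbs + 1 := by
  rcases pv_maxLevelA_last n (n.natAbs + 1) 1 with h | h
  · omega
  · have h1 := pv_nat_lt_two_pow_int (pvMaxLevelA n (n.natAbs + 1) 1 - 1)
    omega

lemma pv_loopB_char (n : Int) :
    ∀ (fuel lvl : Nat) (acc : List (List (String × Int))),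
    pvMaxLevelA n (n.natAbs + 1) 1 - lvl ≤ fuel →
    pvLoopB n fuel lvl acc = acc ++ (PySem.List.pyRange (lvl : Int)
      ((pvMaxLevelA n (n.natAbs + 1) 1 : Nat) : Int)).flatMap (fun l => pvC n l.toNat) := by
  intro fuel
  induction fuel with
  | zero =>
    intro lvl acc hle
    rw [pvLoopB, pv_pyRange_nil (by omega)]
    simp
  | succ fuel ih =>
    intro lvl acc hle
    rw [pvLoopB]
    by_cases hg : (2 : Int) ^ (lvl + 1) - 1 < n
    · have hlt : lvl < pvMaxLevelA n (n.natAbs + 1) 1 := by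
        by_contra hcon
        have hcon' : pvMaxLevelA n (n.natAbs + 1) 1 ≤ lvl := Nat.le_of_not_lt hcon
        have h1 := pv_maxLevelA_top n
        have h2 : (2 : Int) ^ (pvMaxLevelA n (n.natAbs + 1) 1) ≤ 2 ^ (lvl + 1) :=
          pow_le_pow_right₀ (by norm_num) (by omega)
        omega
      rw [if_pos hg, ih (lvl + 1) (acc ++ pvBucketB n lvl) (by omega)]
      rw [PySem.List.pyRange_one_cons (a := (lvl : Int))
        (b := ((pvMaxLevelA n (n.natAbs + 1) 1 : Nat) : Int)) (by exact_mod_cast hlt),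
        List.flatMap_cons, pv_bucketB_eq]
      have hc : ((lvl : Int)) + 1 = ((lvl + 1 : Nat) : Int) := by push_cast; ring
      rw [hc]
      simp [List.append_assoc]
    · rw [if_neg hg]
      have hempty : ∀ l ∈ PySem.List.pyRange (lvl : Int)
          ((pvMaxLevelA n (n.natAbs + 1) 1 : Nat) : Int), pvC n l.toNat = [] := by
        intro l hl
        have hml := PySem.List.mem_pyRange_one.mp hl
        unfold pvC
        rw [List.flatMap_eq_nil_iff]
        intro i hi
        have h0 : (0 : Int) ≤ i := (PySem.List.mem_pyRange_one.mp hi).1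
        simp only [pvSel]
        rw [if_neg]
        rintro ⟨_, hlt2⟩
        have hmono : (2 : Int) ^ (lvl + 1) ≤ 2 ^ (l.toNat + 1) :=
          pow_le_pow_right₀ (by norm_num) (by omega)
        have hble := pv_mask_le_bor i h0 (l.toNat + 1)
        omega
      rw [List.flatMap_eq_nil_iff.mpr hempty]
      simp

-- ===== VERDICT (by name: the statement is the Claim_ definition above) =====
theorem task_list_spec : Claim_equal_task_list := by
  intro n _
  unfold Spec_task_list task_list_alt
  rw [pv_A_eq, pv_loopB_char n (n.natAbs + 1) 0 [] (by have := pv_L_le n; omega)]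
  simp
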